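-- pv_equiv track=rewrite | github.com/KawanJ/VocalWave | Helper_Files/nlp.py | matched_keyword
-- ===== SOURCE A (Python) =====
-- COMMANDS = ['play', 'start', 'pause', 'like', 'shuffle', 'mix', 'random', 'liked', 'next', 'previous', 'rewind', 'repeat', 'stop', 'increase', 'decrease']
--
-- def matched_keyword(input_tokens):
--     matched = []
--     for word in input_tokens:
--         if word in COMMANDS:
--             matched.append(word)
--
--     if ('stop' in matched or 'pause' in matched):
--         return 'stop'
--     if ('next' in matched):
--         return 'next'
--     if ('previous' in matched):
--         return 'previous'
--     if ('play' in matched or 'start' in matched):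
--         return 'play'
--     if ('like' in matched or 'liked' in matched):
--         return 'like'
--     if ('shuffle' in matched or 'mix' in matched or 'random' in matched):
--         return 'shuffle'
--     if ('repeat' in matched or 'rewind' in matched):
--         return 'repeat'
--     if ('increase' in matched):
--         return 'increase'
--     if ('decrease' in matched):
--         return 'decrease'
--
--     return "No command found"
-- ===== SOURCE B (Python) =====
-- PRIORITY = {'stop': 0, 'pause': 0, 'next': 1, 'previous': 2, 'play': 3, 'start': 3,
--             'like': 4, 'liked': 4, 'shuffle': 5, 'mix': 5, 'random': 5,
--             'repeat': 6, 'rewind': 6, 'increase': 7, 'decrease': 8}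
-- RESULT = ['stop', 'next', 'previous', 'play', 'like', 'shuffle', 'repeat',
--           'increase', 'decrease', 'No command found']
--
-- def matched_keyword(input_tokens):
--     best = 9
--     for word in input_tokens:
--         best = min(best, PRIORITY.get(word, 9))
--     return RESULT[best]
-- ===== Notes on version B (the rewrite author's own statement) =====
-- stated objective: alternative
-- what changed: Instead of filtering tokens into a matched list and testing nine hard-coded membership cascades, B makes a single pass over the tokens reducing them to the minimum priority rank (via a rank dict) and returns the result table entry at that rank.
import Mathlib
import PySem

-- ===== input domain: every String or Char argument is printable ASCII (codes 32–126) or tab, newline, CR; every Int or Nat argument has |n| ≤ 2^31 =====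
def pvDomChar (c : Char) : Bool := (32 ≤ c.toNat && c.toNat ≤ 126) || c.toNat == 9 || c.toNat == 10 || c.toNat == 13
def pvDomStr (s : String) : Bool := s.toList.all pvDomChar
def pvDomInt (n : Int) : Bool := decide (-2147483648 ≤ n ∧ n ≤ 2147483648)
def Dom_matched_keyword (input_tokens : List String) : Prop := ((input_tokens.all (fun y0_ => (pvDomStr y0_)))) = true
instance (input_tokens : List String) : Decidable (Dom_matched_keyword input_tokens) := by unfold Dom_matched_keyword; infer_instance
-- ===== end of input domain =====

-- B replaces A's filter-into-matched pass plus nine membership cascades by a single pass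
-- over the tokens reducing them to the minimum priority rank, then one table lookup (objective: alternative).

-- ===== PORT A =====
def pvCOMMANDS : List String :=
  ["play", "start", "pause", "like", "shuffle", "mix", "random", "liked",
   "next", "previous", "rewind", "repeat", "stop", "increase", "decrease"]

def matched_keyword (input_tokens : List String) : String :=
  let matched := input_tokens.foldl
    (fun acc word => if word ∈ pvCOMMANDS then acc ++ [word] else acc) []
  if "stop" ∈ matched ∨ "pause" ∈ matched then "stop"
  else if "next" ∈ matched then "next"
  else if "previous" ∈ matched then "previous"
  else if "play" ∈ matched ∨ "start" ∈ matched then "play"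
  else if "like" ∈ matched ∨ "liked" ∈ matched then "like"
  else if "shuffle" ∈ matched ∨ "mix" ∈ matched ∨ "random" ∈ matched then "shuffle"
  else if "repeat" ∈ matched ∨ "rewind" ∈ matched then "repeat"
  else if "increase" ∈ matched then "increase"
  else if "decrease" ∈ matched then "decrease"
  else "No command found"

-- ===== PORT B =====
def pvPRIORITY : PySem.Dict String Nat := PySem.Dict.ofList
  [("stop", 0), ("pause", 0), ("next", 1), ("previous", 2), ("play", 3), ("start", 3),
   ("like", 4), ("liked", 4), ("shuffle", 5), ("mix", 5), ("random", 5),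
   ("repeat", 6), ("rewind", 6), ("increase", 7), ("decrease", 8)]

def pvRESULT : List String :=
  ["stop", "next", "previous", "play", "like", "shuffle", "repeat",
   "increase", "decrease", "No command found"]

def pvPrio (word : String) : Nat := pvPRIORITY.getD word 9

def matched_keyword_alt (input_tokens : List String) : String :=
  let best := input_tokens.foldl (fun best word => min best (pvPrio word)) 9
  pvRESULT.getD best ""   -- best is always a valid index 0..9; getD only makes the lookup total

-- ===== PRECONDITION & SPEC =====
def Spec_matched_keyword (input_tokens : List String) (out : String) : Prop := out = matched_keyword_alt input_tokens
instance (input_tokens : List String) (out : String) : Decidable (Spec_matched_keyword input_tokens out) := by unfold Spec_matched_keyword; infer_instance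

-- ===== CLAIM (what is proved, stated in full; the proofs are below) =====
def Claim_equal_matched_keyword : Prop := ∀ (input_tokens : List String), Dom_matched_keyword input_tokens → Spec_matched_keyword input_tokens (matched_keyword input_tokens)

-- ===== LEMMAS AND PROOFS =====

-- the 15 trigger words, in priority order (= pvPRIORITY.keys)
def pvKEYS : List String :=
  ["stop", "pause", "next", "previous", "play", "start", "like", "liked",
   "shuffle", "mix", "random", "repeat", "rewind", "increase", "decrease"]

-- A's filter-style foldl collects exactly the input words that are commands.
theorem mem_matched_foldl (xs : List String) (acc : List String) (w : String) :
    w ∈ xs.foldl (fun acc word => if word ∈ pvCOMMANDS then acc ++ [word] else acc) acc ↔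
      w ∈ acc ∨ (w ∈ xs ∧ w ∈ pvCOMMANDS) := by
  induction xs generalizing acc with
  | nil => simp
  | cons x xs ih =>
      simp only [List.foldl_cons, ih, List.mem_cons]
      split
      · next h =>
          simp only [List.mem_append, List.mem_singleton]
          constructor
          · rintro ((h1 | rfl) | ⟨h2, hc⟩)
            · exact Or.inl h1
            · exact Or.inr ⟨Or.inl rfl, h⟩
            · exact Or.inr ⟨Or.inr h2, hc⟩
          · rintro (h1 | ⟨rfl | h2, hc⟩)
            · exact Or.inl (Or.inl h1)
            · exact Or.inl (Or.inr rfl)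
            · exact Or.inr ⟨h2, hc⟩
      · next h =>
          constructor
          · rintro (h1 | ⟨h2, hc⟩)
            · exact Or.inl h1
            · exact Or.inr ⟨Or.inr h2, hc⟩
          · rintro (h1 | ⟨rfl | h2, hc⟩)
            · exact Or.inl h1
            · exact absurd hc h
            · exact Or.inr ⟨h2, hc⟩

theorem mem_matched (xs : List String) (w : String) :
    (w ∈ xs.foldl (fun acc word => if word ∈ pvCOMMANDS then acc ++ [word] else acc) []) ↔
      w ∈ xs ∧ w ∈ pvCOMMANDS := by
  rw [mem_matched_foldl]; simp

-- B's min-fold is ≤ k iff the start value is or some token's priority is.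
theorem foldl_min_le (xs : List String) (b0 k : Nat) :
    xs.foldl (fun best word => min best (pvPrio word)) b0 ≤ k ↔
      b0 ≤ k ∨ ∃ w ∈ xs, pvPrio w ≤ k := by
  induction xs generalizing b0 with
  | nil => simp
  | cons x xs ih =>
      simp only [List.foldl_cons, ih, min_le_iff, List.mem_cons]
      constructor
      · rintro ((h | h) | ⟨w, hw, hp⟩)
        · exact Or.inl h
        · exact Or.inr ⟨x, Or.inl rfl, h⟩
        · exact Or.inr ⟨w, Or.inr hw, hp⟩
      · rintro (h | ⟨w, rfl | hw, hp⟩)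
        · exact Or.inl (Or.inl h)
        · exact Or.inl (Or.inr hp)
        · exact Or.inr ⟨w, hw, hp⟩

-- a word outside the rank dict has default priority 9
theorem pvPrio_of_not_mem (w : String) (hw : w ∉ pvKEYS) : pvPrio w = 9 := by
  apply PySem.Dict.getD_of_not_contains
  rw [PySem.Dict.contains_eq_decide_mem_keys, show pvPRIORITY.keys = pvKEYS from by decide]
  simp [hw]

-- a word of priority ≤ k is one of the triggers of the priority groups up to k
theorem pvPrio_le_mem (w : String) (k : Nat) (h : pvPrio w ≤ k) (hk : k ≤ 8) :
    w ∈ pvKEYS.take ([2, 3, 4, 6, 8, 11, 13, 14, 15].getD k 0) := by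
  by_cases hw : w ∈ pvKEYS
  · interval_cases k <;>
    · fin_cases hw <;> revert h <;> decide
  · rw [pvPrio_of_not_mem w hw] at h; omega

-- the fold equals k when some token reaches rank k and none goes below it
theorem fold_eq (xs : List String) (k : Nat) (hk9 : k ≤ 9)
    (hup : k = 9 ∨ ∃ w ∈ xs, pvPrio w = k)
    (hlow : ∀ w ∈ xs, ¬ pvPrio w < k) :
    xs.foldl (fun best word => min best (pvPrio word)) 9 = k := by
  have h1 : xs.foldl (fun best word => min best (pvPrio word)) 9 ≤ k := by
    rcases hup with rfl | ⟨w, hw, hp⟩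
    · exact (foldl_min_le xs 9 9).2 (Or.inl le_rfl)
    · exact (foldl_min_le xs 9 k).2 (Or.inr ⟨w, hw, le_of_eq hp⟩)
  rcases Nat.eq_zero_or_pos k with rfl | hk
  · omega
  · have h2 : ¬ xs.foldl (fun best word => min best (pvPrio word)) 9 ≤ k - 1 := by
      rw [foldl_min_le]
      rintro (h | ⟨w, hw, hp⟩)
      · omega
      · exact hlow w hw (by omega)
    omega

-- ===== VERDICT (by name: the statement is the Claim_ definition above) =====
theorem matched_keyword_spec : Claim_equal_matched_keyword := by
  intro xs _
  show matched_keyword xs = matched_keyword_alt xs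
  simp only [matched_keyword, matched_keyword_alt, mem_matched]
  simp only [pvCOMMANDS, List.mem_cons, List.not_mem_nil, String.reduceEq, or_false,
    false_or, or_self, and_true]
  split_ifs with h0 h1 h2 h3 h4 h5 h6 h7 h8
  · rw [fold_eq xs 0 (by omega) ?_ ?_]
    · rfl
    · refine Or.inr ?_
      rcases h0 with h | h
      exacts [⟨"stop", h, by decide⟩, ⟨"pause", h, by decide⟩]
    · intro w hw hlt; omega
  · rw [fold_eq xs 1 (by omega) (Or.inr ⟨"next", h1, by decide⟩) ?_]
    · rfl
    · intro w hw hlt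
      have := pvPrio_le_mem w 0 (by omega) (by omega)
      simp [pvKEYS] at this
      rcases this with rfl | rfl <;> tauto
  · rw [fold_eq xs 2 (by omega) (Or.inr ⟨"previous", h2, by decide⟩) ?_]
    · rfl
    · intro w hw hlt
      have := pvPrio_le_mem w 1 (by omega) (by omega)
      simp [pvKEYS] at this
      rcases this with rfl | rfl | rfl <;> tauto
  · rw [fold_eq xs 3 (by omega) ?_ ?_]
    · rfl
    · refine Or.inr ?_
      rcases h3 with h | h
      exacts [⟨"play", h, by decide⟩, ⟨"start", h, by decide⟩]
    · intro w hw hlt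
      have := pvPrio_le_mem w 2 (by omega) (by omega)
      simp [pvKEYS] at this
      rcases this with rfl | rfl | rfl | rfl <;> tauto
  · rw [fold_eq xs 4 (by omega) ?_ ?_]
    · rfl
    · refine Or.inr ?_
      rcases h4 with h | h
      exacts [⟨"like", h, by decide⟩, ⟨"liked", h, by decide⟩]
    · intro w hw hlt
      have := pvPrio_le_mem w 3 (by omega) (by omega)
      simp [pvKEYS] at this
      rcases this with rfl | rfl | rfl | rfl | rfl | rfl <;> tauto
  · rw [fold_eq xs 5 (by omega) ?_ ?_]
    · rfl
    · refine Or.inr ?_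
      rcases h5 with h | h | h
      exacts [⟨"shuffle", h, by decide⟩, ⟨"mix", h, by decide⟩, ⟨"random", h, by decide⟩]
    · intro w hw hlt
      have := pvPrio_le_mem w 4 (by omega) (by omega)
      simp [pvKEYS] at this
      rcases this with rfl | rfl | rfl | rfl | rfl | rfl | rfl | rfl <;> tauto
  · rw [fold_eq xs 6 (by omega) ?_ ?_]
    · rfl
    · refine Or.inr ?_
      rcases h6 with h | h
      exacts [⟨"repeat", h, by decide⟩, ⟨"rewind", h, by decide⟩]
    · intro w hw hlt
      have := pvPrio_le_mem w 5 (by omega) (by omega)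
      simp [pvKEYS] at this
      rcases this with rfl | rfl | rfl | rfl | rfl | rfl | rfl | rfl | rfl | rfl | rfl <;> tauto
  · rw [fold_eq xs 7 (by omega) (Or.inr ⟨"increase", h7, by decide⟩) ?_]
    · rfl
    · intro w hw hlt
      have := pvPrio_le_mem w 6 (by omega) (by omega)
      simp [pvKEYS] at this
      rcases this with rfl | rfl | rfl | rfl | rfl | rfl | rfl | rfl | rfl | rfl | rfl | rfl | rfl <;> tauto
  · rw [fold_eq xs 8 (by omega) (Or.inr ⟨"decrease", h8, by decide⟩) ?_]
    · rfl
    · intro w hw hlt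
      have := pvPrio_le_mem w 7 (by omega) (by omega)
      simp [pvKEYS] at this
      rcases this with rfl | rfl | rfl | rfl | rfl | rfl | rfl | rfl | rfl | rfl | rfl | rfl | rfl | rfl <;> tauto
  · rw [fold_eq xs 9 (by omega) (Or.inl rfl) ?_]
    · rfl
    · intro w hw hlt
      have := pvPrio_le_mem w 8 (by omega) (by omega)
      simp [pvKEYS] at this
      rcases this with rfl | rfl | rfl | rfl | rfl | rfl | rfl | rfl | rfl | rfl | rfl | rfl | rfl | rfl | rfl <;> tauto
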